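-- pv_equiv track=rewrite | github.com/anant-joshi/bothoven | task1_code.py | get_notes_in_time_domain
-- ===== SOURCE A (Python) =====
-- def get_notes_in_time_domain(windows, rms_values):
-- 	j = 0;
-- 	notes = []
-- 	notes.append([])
-- 	silent = False
-- 	for i in range(len(windows)):
-- 		if rms_values[i] > 0:
-- 			silent = False
-- 			notes[j].extend(windows[i])
-- 		else:
-- 			if not silent:
-- 				j = j+1
-- 				notes.append([])
-- 				silent = True
-- 	return notes
-- ===== SOURCE B (Python) =====
-- def get_notes_in_time_domain(windows, rms_values):
--     n = len(windows)
--     flags = [rms_values[i] > 0 for i in range(n)]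
--     notes = [[]]
--     i = 0
--     while i < n:
--         j = i
--         while j < n and flags[j] == flags[i]:
--             j += 1
--         if flags[i]:
--             chunk = []
--             for w in windows[i:j]:
--                 chunk.extend(w)
--             notes[-1] = notes[-1] + chunk
--         else:
--             notes.append([])
--         i = j
--     return notes
-- ===== Notes on version B (the rewrite author's own statement) =====
-- stated objective: alternative
-- what changed: Replaces A's per-element j/silent state machine with a run-based pass: a precomputed silence-flag list is split into maximal runs of equal flags, each active run is concatenated into the last note in one step and each silent run appends exactly one new empty note.
import Mathlib
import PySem

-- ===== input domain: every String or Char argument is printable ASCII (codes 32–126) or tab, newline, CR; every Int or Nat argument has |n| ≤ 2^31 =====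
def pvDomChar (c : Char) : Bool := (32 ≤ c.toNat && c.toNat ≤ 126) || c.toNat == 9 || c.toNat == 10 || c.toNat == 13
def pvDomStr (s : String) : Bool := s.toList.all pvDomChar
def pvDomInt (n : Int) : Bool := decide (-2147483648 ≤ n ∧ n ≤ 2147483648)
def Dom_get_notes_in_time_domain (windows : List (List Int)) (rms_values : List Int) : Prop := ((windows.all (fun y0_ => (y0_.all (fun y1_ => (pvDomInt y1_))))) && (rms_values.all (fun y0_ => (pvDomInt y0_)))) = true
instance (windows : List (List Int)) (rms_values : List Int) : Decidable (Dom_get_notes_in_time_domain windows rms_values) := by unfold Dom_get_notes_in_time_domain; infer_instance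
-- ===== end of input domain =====

-- B replaces A's per-element silent/j state machine by a run-based pass (split maximal
-- runs of equal silence flags, one concatenated extend per active run, one new empty
-- note per silent run); objective: alternative decomposition, same cost.

-- ===== PORT A =====
-- A: element-wise state machine (j, notes, silent) over i in range(len(windows)).
-- rms_values[i] is ported with pyGetD; its default is never read inside Pre_ (Python
-- raises IndexError exactly where Pre_ fails).  j is Python's nonnegative int counter.
def get_notes_in_time_domain (windows : List (List Int)) (rms_values : List Int) : List (List Int) :=
  let fin := (List.range windows.length).foldl
    (fun st i =>
      match st with
      | (j, notes, silent) =>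
        if PySem.List.pyGetD rms_values (i : Int) 0 > 0 then
          (j, notes.set j (notes.getD j [] ++ windows.getD i []), false)
        else if silent = false then
          (j + 1, notes ++ [[]], true)
        else
          (j, notes, silent))
    ((0 : Nat), ([[]] : List (List Int)), false)
  fin.2.1

-- ===== PORT B =====
-- flags = [rms_values[i] > 0 for i in range(len(windows))]
def pvFlags (windows : List (List Int)) (rms_values : List Int) : List Bool :=
  (List.range windows.length).map (fun i => decide ((PySem.List.pyGetD rms_values (Int.ofNat i) 0) > 0))

-- the inner "while j < n and flags[j] == flags[i]" scan: leading run with flag b, rest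
def pvSplitRun (b : Bool) : List (Bool × List Int) → List (Bool × List Int) × List (Bool × List Int)
  | [] => ([], [])
  | p :: rest =>
    if p.1 = b then
      let s := pvSplitRun b rest
      (p :: s.1, s.2)
    else ([], p :: rest)

-- termination measure for pvRunLoop (cited in decreasing_by)
theorem pvSplitRun_length (b : Bool) (l : List (Bool × List Int)) :
    (pvSplitRun b l).2.length ≤ l.length := by
  induction l with
  | nil => simp [pvSplitRun]
  | cons p rest ih =>
    simp only [pvSplitRun]
    split
    · simpa using Nat.le_succ_of_le ih
    · simp

-- the outer "while i < n" loop of B, one iteration per run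
def pvRunLoop : List (Bool × List Int) → List (List Int) → List (List Int)
  | [], notes => notes
  | p :: rest, notes =>
    let s := pvSplitRun p.1 rest
    if p.1 then
      let chunk := (p :: s.1).foldl (fun acc q => acc ++ q.2) []
      pvRunLoop s.2 (notes.dropLast ++ [notes.getLastD [] ++ chunk])
    else
      pvRunLoop s.2 (notes ++ [[]])
termination_by l _ => l.length
decreasing_by all_goals exact Nat.lt_succ_of_le (pvSplitRun_length _ _)

def get_notes_in_time_domain_alt (windows : List (List Int)) (rms_values : List Int) : List (List Int) :=
  pvRunLoop ((pvFlags windows rms_values).zip windows) [[]]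

-- ===== PRECONDITION & SPEC =====
-- Pre_ excludes exactly the inputs where Python A raises IndexError (rms_values shorter
-- than windows); B raises there too.
def Pre_get_notes_in_time_domain (windows : List (List Int)) (rms_values : List Int) : Prop :=
  windows.length ≤ rms_values.length
instance (windows : List (List Int)) (rms_values : List Int) : Decidable (Pre_get_notes_in_time_domain windows rms_values) := by unfold Pre_get_notes_in_time_domain; infer_instance

def pvWitness_get_notes_in_time_domain : List (List Int) × List Int := ([[1], [2, 3]], [1, 0])

def Spec_get_notes_in_time_domain (windows : List (List Int)) (rms_values : List Int) (out : List (List Int)) : Prop := out = get_notes_in_time_domain_alt windows rms_values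
instance (windows : List (List Int)) (rms_values : List Int) (out : List (List Int)) : Decidable (Spec_get_notes_in_time_domain windows rms_values out) := by unfold Spec_get_notes_in_time_domain; infer_instance

-- ===== CLAIM (what is proved, stated in full; the proofs are below) =====
def Claim_equal_get_notes_in_time_domain : Prop := ∀ (windows : List (List Int)) (rms_values : List Int), Dom_get_notes_in_time_domain windows rms_values → Pre_get_notes_in_time_domain windows rms_values → Spec_get_notes_in_time_domain windows rms_values (get_notes_in_time_domain windows rms_values)

-- ===== LEMMAS AND PROOFS =====

-- A's loop body, abstracted over the (flag, window) pair it reads at index i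
def pvStep (st : Nat × List (List Int) × Bool) (p : Bool × List Int) : Nat × List (List Int) × Bool :=
  match st with
  | (j, notes, silent) =>
    if p.1 then (j, notes.set j (notes.getD j [] ++ p.2), false)
    else if silent = false then (j + 1, notes ++ [[]], true)
    else (j, notes, silent)

-- "append w to the last note"
def pvAppLast (notes : List (List Int)) (w : List Int) : List (List Int) :=
  notes.dropLast ++ [notes.getLastD [] ++ w]

theorem pvAppLast_ne_nil (notes : List (List Int)) (w : List Int) : pvAppLast notes w ≠ [] := by
  simp [pvAppLast]

theorem pvAppLast_length (notes : List (List Int)) (w : List Int) (h : notes ≠ []) :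
    (pvAppLast notes w).length = notes.length := by
  have : 0 < notes.length := List.length_pos_of_ne_nil h
  simp [pvAppLast]
  omega

theorem pv_set_last (notes : List (List Int)) (x : List Int) (h : notes ≠ []) :
    notes.set (notes.length - 1) x = notes.dropLast ++ [x] := by
  induction notes with
  | nil => simp at h
  | cons a t ih =>
    cases t with
    | nil => simp
    | cons b t2 =>
      have h2 := ih (by simp)
      simp only [List.length_cons, Nat.add_sub_cancel] at h2 ⊢
      simp only [List.set, List.dropLast_cons₂, List.cons_append]
      exact congrArg (a :: ·) h2

theorem pv_getD_last (notes : List (List Int)) :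
    notes.getD (notes.length - 1) [] = notes.getLastD [] := by
  rw [List.getLastD_eq_getLast?, List.getD_eq_getElem?_getD, List.getLast?_eq_getElem?]

theorem pvStep_true (notes : List (List Int)) (s : Bool) (w : List Int) (h : notes ≠ []) :
    pvStep (notes.length - 1, notes, s) (true, w) = (notes.length - 1, pvAppLast notes w, false) := by
  simp only [pvStep, reduceIte]
  rw [pv_set_last _ _ h, pv_getD_last _]
  simp only [pvAppLast]

theorem pvSplitRun_false (l : List (Bool × List Int)) :
    (pvSplitRun false l).2 = l.dropWhile (fun p => !p.1) := by
  induction l with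
  | nil => simp [pvSplitRun]
  | cons p rest ih =>
    cases hp : p.1 <;> simp [pvSplitRun, hp, List.dropWhile, ih]

-- one active element unrolls off the front of an active run
theorem pvRunLoop_true_cons (rest : List (Bool × List Int)) (notes : List (List Int))
    (w : List Int) :
    pvRunLoop ((true, w) :: rest) notes = pvRunLoop rest (pvAppLast notes w) := by
  match rest with
  | [] => simp [pvRunLoop, pvSplitRun, pvAppLast]
  | (false, v) :: r2 => simp [pvRunLoop, pvSplitRun, pvAppLast]
  | (true, v) :: r2 =>
    simp only [pvRunLoop, pvSplitRun, reduceIte,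
      PySem.List.foldl_append_eq_flatMap]
    simp [pvAppLast, List.append_assoc]

theorem pv_main (ps : List (Bool × List Int)) :
    ∀ notes : List (List Int), notes ≠ [] →
      ((ps.foldl pvStep (notes.length - 1, notes, false)).2.1 = pvRunLoop ps notes)
      ∧ ((ps.foldl pvStep (notes.length - 1, notes, true)).2.1
          = pvRunLoop (ps.dropWhile (fun p => !p.1)) notes) := by
  induction ps with
  | nil => intro notes h; simp [pvRunLoop]
  | cons p rest ih =>
    obtain ⟨b, w⟩ := p
    intro notes h
    cases b with
    | true =>
      have key : (rest.foldl pvStep (notes.length - 1, pvAppLast notes w, false)).2.1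
          = pvRunLoop ((true, w) :: rest) notes := by
        rw [pvRunLoop_true_cons]
        have hlen : notes.length - 1 = (pvAppLast notes w).length - 1 := by
          rw [pvAppLast_length _ _ h]
        rw [hlen]
        exact (ih (pvAppLast notes w) (pvAppLast_ne_nil _ _)).1
      refine ⟨?_, ?_⟩
      · rw [List.foldl_cons, pvStep_true _ _ _ h]; exact key
      · rw [List.foldl_cons, pvStep_true _ _ _ h]
        simpa using key
    | false =>
      have hlt : 0 < notes.length := List.length_pos_of_ne_nil h
      refine ⟨?_, ?_⟩
      · rw [List.foldl_cons]
        have hstep : pvStep (notes.length - 1, notes, false) (false, w)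
            = (notes.length - 1 + 1, notes ++ [[]], true) := by
          simp [pvStep]
        rw [hstep]
        have hl : notes.length - 1 + 1 = (notes ++ [[]]).length - 1 := by
          simp; omega
        rw [hl, (ih (notes ++ [[]]) (by simp)).2]
        simp only [pvRunLoop, Bool.false_eq_true, reduceIte]
        rw [pvSplitRun_false]
      · rw [List.foldl_cons]
        have hstep : pvStep (notes.length - 1, notes, true) (false, w)
            = (notes.length - 1, notes, true) := by
          simp [pvStep]
        rw [hstep, (ih notes h).2]
        simp [List.dropWhile]

theorem pv_foldl_range_eq {α σ : Type} (l : List α) (g : σ → α → σ) :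
    ∀ (body : σ → Nat → σ),
      (∀ st i, (hi : i < l.length) → body st i = g st l[i]) →
      ∀ init, (List.range l.length).foldl body init = l.foldl g init := by
  induction l with
  | nil => intro body _ init; simp
  | cons a t ih =>
    intro body hb init
    rw [List.length_cons, List.range_succ_eq_map, List.foldl_cons, List.foldl_map,
      hb init 0 (by simp)]
    simp only [List.getElem_cons_zero]
    exact ih (fun st i => body st (i + 1))
      (fun st i hi => by simpa using hb st (i + 1) (by simpa using Nat.succ_lt_succ hi))
      (g init a)

theorem pv_bridge (windows : List (List Int)) (rms_values : List Int) :
    get_notes_in_time_domain windows rms_values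
      = (((pvFlags windows rms_values).zip windows).foldl pvStep
          ((0 : Nat), ([[]] : List (List Int)), false)).2.1 := by
  have hlen : ((pvFlags windows rms_values).zip windows).length = windows.length := by
    simp [pvFlags]
  show ((List.range windows.length).foldl
      (fun st i => match st with
        | (j, notes, silent) =>
          if PySem.List.pyGetD rms_values (i : Int) 0 > 0 then
            (j, notes.set j (notes.getD j [] ++ windows.getD i []), false)
          else if silent = false then (j + 1, notes ++ [[]], true)
          else (j, notes, silent))
      ((0 : Nat), ([[]] : List (List Int)), false)).2.1 = _
  apply congrArg (fun st : Nat × List (List Int) × Bool => st.2.1)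
  rw [← hlen]
  apply pv_foldl_range_eq
  intro st i hi
  obtain ⟨j, notes, silent⟩ := st
  have hiw : i < windows.length := by rwa [hlen] at hi
  have hz : ((pvFlags windows rms_values).zip windows)[i]
      = ((pvFlags windows rms_values)[i]'(by simp [pvFlags]; exact hiw), windows[i]'hiw) := by
    exact List.getElem_zip
  have hf : (pvFlags windows rms_values)[i]'(by simp [pvFlags]; exact hiw)
      = decide (0 < PySem.List.pyGetD rms_values (Int.ofNat i) 0) := by
    simp only [pvFlags]; rw [List.getElem_map, List.getElem_range]
  rw [hz]
  simp only [pvStep, hf]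
  simp [List.getD_eq_getElem?_getD, hiw]

-- ===== VERDICT (by name: the statement is the Claim_ definition above) =====
theorem get_notes_in_time_domain_spec : Claim_equal_get_notes_in_time_domain := by
  intro windows rms_values _ _
  unfold Spec_get_notes_in_time_domain get_notes_in_time_domain_alt
  rw [pv_bridge]
  have h := (pv_main ((pvFlags windows rms_values).zip windows) [[]] (by simp)).1
  simpa using h
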